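-- pv_equiv track=rewrite | github.com/Barmaman1012/Translarions-Embeddings | backend/app/services/upload_service.py | _label_to_filename
-- ===== SOURCE A (Python) =====
-- def _label_to_filename(label: str, index: int) -> str:
--     stripped = label.strip()
--     if stripped:
--         normalized = "".join(
--             character.lower() if character.isalnum() else "-"
--             for character in stripped
--         )
--         normalized = "-".join(part for part in normalized.split("-") if part)
--         if normalized:
--             return "{}.txt".format(normalized)
--
--     return "translation-{}.txt".format(index + 1)
-- ===== SOURCE B (Python) =====
-- def _label_to_filename(label: str, index: int) -> str:
--     # Single-pass tokenizer: build the word list directly instead of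
--     # constructing a dash-filled string and re-splitting it.
--     words = []
--     current = []
--     for character in label.strip():
--         if character.isalnum():
--             current.append(character.lower())
--         else:
--             if current:
--                 words.append("".join(current))
--                 current = []
--     if current:
--         words.append("".join(current))
--     if words:
--         return "{}.txt".format("-".join(words))
--     return "translation-{}.txt".format(index + 1)
-- ===== Notes on version B (the rewrite author's own statement) =====
-- stated objective: alternative
-- what changed: Replaces A's map-to-dashes / split-on-dash / filter / re-join pipeline with a single-pass tokenizer that maintains a current-word buffer and flushes completed words into a word list.
import Mathlib
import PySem

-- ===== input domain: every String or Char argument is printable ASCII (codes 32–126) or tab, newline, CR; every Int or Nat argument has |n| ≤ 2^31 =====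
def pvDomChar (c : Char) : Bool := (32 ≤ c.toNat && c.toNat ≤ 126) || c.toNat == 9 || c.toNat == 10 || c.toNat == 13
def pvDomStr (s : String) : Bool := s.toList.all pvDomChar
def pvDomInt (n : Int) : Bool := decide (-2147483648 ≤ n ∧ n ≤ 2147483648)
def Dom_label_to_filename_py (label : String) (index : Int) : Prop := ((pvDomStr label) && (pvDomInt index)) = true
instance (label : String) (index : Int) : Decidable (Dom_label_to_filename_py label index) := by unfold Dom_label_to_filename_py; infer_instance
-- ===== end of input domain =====

-- B replaces A's map-to-dashes / split-on-dash / filter / re-join pipeline with a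
-- single-pass tokenizer maintaining a current-word buffer and a word list (alternative decomposition).


-- ===== PORT A =====
-- A: strip; map each char to lower-or-dash; join to one string; split on '-',
-- drop empty parts, re-join with '-'; fall back to "translation-{index+1}.txt".
def label_to_filename_py (label : String) (index : Int) : String :=
  let stripped := PySem.Chars.strip label.toList
  if stripped ≠ [] then
    let normalized := PySem.Chars.join []
      (stripped.map (fun c => if PySem.Chars.isalnum c then [PySem.Chars.lowerChar c] else ['-']))
    let normalized2 := PySem.Chars.join ['-']
      ((PySem.Chars.splitOn normalized ['-']).filter (fun p => p ≠ []))
    if normalized2 ≠ [] then String.ofList (normalized2 ++ ".txt".toList)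
    else String.ofList ("translation-".toList ++ (PySem.Int.toStr (index + 1)).toList ++ ".txt".toList)
  else String.ofList ("translation-".toList ++ (PySem.Int.toStr (index + 1)).toList ++ ".txt".toList)

-- ===== PORT B =====
-- flush the current-word buffer into the word list (if non-empty)
def pvFlush (words : List (List Char)) (cur : List Char) : List (List Char) :=
  if cur ≠ [] then words ++ [cur] else words

-- one step of B's tokenizer loop
def pvStep (st : List (List Char) × List Char) (c : Char) : List (List Char) × List Char :=
  if PySem.Chars.isalnum c then (st.1, st.2 ++ [PySem.Chars.lowerChar c])
  else (pvFlush st.1 st.2, [])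

def label_to_filename_py_alt (label : String) (index : Int) : String :=
  let st := (PySem.Chars.strip label.toList).foldl pvStep ([], [])
  let words := pvFlush st.1 st.2
  if words ≠ [] then String.ofList (PySem.Chars.join ['-'] words ++ ".txt".toList)
  else String.ofList ("translation-".toList ++ (PySem.Int.toStr (index + 1)).toList ++ ".txt".toList)

-- ===== PRECONDITION & SPEC =====
def Spec_label_to_filename_py (label : String) (index : Int) (out : String) : Prop := out = label_to_filename_py_alt label index
instance (label : String) (index : Int) (out : String) : Decidable (Spec_label_to_filename_py label index out) := by unfold Spec_label_to_filename_py; infer_instance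

-- ===== CLAIM (what is proved, stated in full; the proofs are below) =====
def Claim_equal_label_to_filename_py : Prop := ∀ (label : String) (index : Int), Dom_label_to_filename_py label index → Spec_label_to_filename_py label index (label_to_filename_py label index)

-- ===== LEMMAS AND PROOFS =====
lemma char_le_iff {a b : Char} : a ≤ b ↔ a.toNat ≤ b.toNat := by
  rw [Char.le_def, UInt32.le_iff_toNat_le]; rfl

-- reference splitter on '-' (pre = characters of the current piece read so far)
def splitDash : List Char → List Char → List (List Char)
  | pre, [] => [pre]
  | pre, c :: rest => if c = '-' then pre :: splitDash [] rest else splitDash (pre ++ [c]) rest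

lemma go_spec : ∀ (fuel : Nat) (l cur : List Char) (hacc : List (List Char)),
    l.length < fuel →
    PySem.Chars.splitOn.go ['-'] fuel l cur hacc = hacc.reverse ++ splitDash cur.reverse l := by
  intro fuel
  induction fuel with
  | zero => intro l cur hacc h; omega
  | succ n ih =>
    intro l cur hacc h
    cases l with
    | nil => simp [PySem.Chars.splitOn.go, splitDash]
    | cons c rest =>
      simp only [PySem.Chars.splitOn.go]
      by_cases hc : c = '-'
      · subst hc
        simp only [List.isPrefixOf, BEq.rfl, Bool.true_and, if_pos]
        rw [ih]
        · simp [splitDash]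
        · simp at h ⊢; omega
      · have hpre : List.isPrefixOf ['-'] (c :: rest) = false := by
          simp [List.isPrefixOf]; exact fun hh => absurd hh.symm hc
        rw [hpre]
        simp only [Bool.false_eq_true, if_false]
        rw [ih rest (c :: cur) hacc (by simp at h ⊢; omega)]
        simp [splitDash, hc]

lemma splitOn_eq_splitDash (s : List Char) :
    PySem.Chars.splitOn s ['-'] = splitDash [] s := by
  unfold PySem.Chars.splitOn
  rw [go_spec _ _ _ _ (by omega)]
  simp

lemma norm_ne_dash (c : Char) (h : PySem.Chars.isalnum c = true) :
    PySem.Chars.lowerChar c ≠ '-' := by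
  intro heq
  unfold PySem.Chars.lowerChar at heq
  split_ifs at heq with hu
  · unfold PySem.Chars.isupper at hu
    simp only [Bool.and_eq_true, decide_eq_true_eq, char_le_iff] at hu
    have hA : ('A').toNat = 65 := by decide
    have hZ : ('Z').toNat = 90 := by decide
    have hval : (c.toNat + 32).isValidChar := by constructor; omega
    have := congrArg Char.toNat heq
    rw [Char.toNat_ofNat] at this
    simp only [hval, if_pos] at this
    have hd : ('-').toNat = 45 := by decide
    omega
  · subst heq
    revert h
    decide

-- loop invariant of B's tokenizer: after processing s from state (ws, cur) and a final
-- flush, the word list is ws followed by the non-empty '-'-separated pieces of cur ++ map norm s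
lemma inv_lemma (s : List Char) : ∀ (ws : List (List Char)) (cur : List Char), '-' ∉ cur →
    (let st := s.foldl pvStep (ws, cur); pvFlush st.1 st.2)
      = ws ++ (splitDash cur (s.map (fun c => if PySem.Chars.isalnum c then PySem.Chars.lowerChar c else '-'))).filter (fun p => p ≠ []) := by
  induction s with
  | nil =>
    intro ws cur hcur
    simp only [List.foldl_nil, splitDash, List.map_nil]
    unfold pvFlush
    by_cases hc : cur = [] <;> simp [hc]
  | cons c rest ih =>
    intro ws cur hcur
    simp only [List.foldl_cons, List.map_cons]
    by_cases ha : PySem.Chars.isalnum c = true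
    · have hne := norm_ne_dash c ha
      rw [show pvStep (ws, cur) c = (ws, cur ++ [PySem.Chars.lowerChar c]) by simp [pvStep, ha]]
      rw [ih ws _ (by simp [hne.symm]; intro hmem; exact hcur hmem)]
      simp only [ha, if_pos, splitDash]
      simp [hne]
    · have ha' : PySem.Chars.isalnum c = false := by simpa using ha
      rw [show pvStep (ws, cur) c = (pvFlush ws cur, []) by simp [pvStep, ha']]
      rw [ih _ [] (by simp)]
      simp only [ha', Bool.false_eq_true, if_false, splitDash]
      unfold pvFlush
      by_cases hc : cur = [] <;> simp [hc]

lemma map_singleton_norm (s : List Char) :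
    PySem.Chars.join [] (s.map (fun c => if PySem.Chars.isalnum c then [PySem.Chars.lowerChar c] else ['-']))
      = s.map (fun c => if PySem.Chars.isalnum c then PySem.Chars.lowerChar c else '-') := by
  have : (s.map (fun c => if PySem.Chars.isalnum c then [PySem.Chars.lowerChar c] else ['-']))
      = (s.map (fun c => if PySem.Chars.isalnum c then PySem.Chars.lowerChar c else '-')).map (fun x => [x]) := by
    rw [List.map_map]
    apply List.map_congr_left
    intro c _
    by_cases h : PySem.Chars.isalnum c = true <;> simp [h]
  rw [this, PySem.Chars.join_nil_singletons]

lemma join_ne_nil (ts : List (List Char)) (hall : ∀ t ∈ ts, t ≠ []) (h : ts ≠ []) :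
    PySem.Chars.join ['-'] ts ≠ [] := by
  match ts with
  | [] => exact absurd rfl h
  | [t] => rw [PySem.Chars.join_singleton]; exact hall t (by simp)
  | t :: t' :: rest =>
    rw [PySem.Chars.join_cons_cons]
    have := hall t (by simp)
    cases t with
    | nil => exact absurd rfl this
    | cons a b => simp

lemma ports_agree (label : String) (index : Int) :
    label_to_filename_py label index = label_to_filename_py_alt label index := by
  simp only [label_to_filename_py, label_to_filename_py_alt, map_singleton_norm,
    splitOn_eq_splitDash]
  have hinv := inv_lemma (PySem.Chars.strip label.toList) [] [] (by simp)
  simp only [List.nil_append] at hinv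
  rw [hinv]
  set T := (splitDash [] ((PySem.Chars.strip label.toList).map
      (fun c => if PySem.Chars.isalnum c then PySem.Chars.lowerChar c else '-'))).filter
      (fun p => p ≠ []) with hT
  by_cases hT0 : T = []
  · simp [hT0]
  · have hall : ∀ t ∈ T, t ≠ [] := by
      intro t ht
      have := (List.mem_filter.mp (hT ▸ ht)).2
      simpa using this
    have hjoin := join_ne_nil T hall hT0
    have hsne : PySem.Chars.strip label.toList ≠ [] := by
      intro h0
      rw [h0] at hT
      simp [splitDash] at hT
      exact hT0 hT
    simp [hsne, hjoin, hT0]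

-- ===== VERDICT (by name: the statement is the Claim_ definition above) =====
theorem label_to_filename_py_spec : Claim_equal_label_to_filename_py := by
  intro label index _
  exact ports_agree label index
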